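-- pv_equiv track=rewrite | github.com/EdvardPedersen/StudentGroups | brute_force.py | check_legal
-- ===== SOURCE A (Python) =====
-- def check_legal(new, current):
--     for elem in current:
--         if new[0] in elem:
--             if new[1] in elem or new[2] in elem:
--                 return False
--         if new[1] in elem and new[2] in elem:
--             return False
--     return True
-- ===== SOURCE B (Python) =====
-- def check_legal(new, current):
--     # inverted index: value -> list of group indices containing it
--     occurs = {}
--     for i, elem in enumerate(current):
--         for v in elem:
--             occurs[v] = occurs.get(v, []) + [i]
--     if not current:
--         return True
--     a, b, c = new[0], new[1], new[2]
--     oa, ob, oc = occurs.get(a, []), occurs.get(b, []), occurs.get(c, [])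
--     return not (any(i in ob for i in oa)
--                 or any(i in oc for i in oa)
--                 or any(i in oc for i in ob))
-- ===== Notes on version B (the rewrite author's own statement) =====
-- stated objective: alternative
-- what changed: Replaces A's per-group pairwise membership tests with early return by an inverted index built in one pass (value -> list of group indices), after which a conflict is a non-empty intersection of two of the three posting lists for new[0], new[1], new[2].
-- outside the precondition, e.g. on check_legal([1, 2], [{1, 2}]): A returns False, B raises IndexError; on check_legal([1, 2], [{5}]): A returns True, B raises IndexError
import Mathlib
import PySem

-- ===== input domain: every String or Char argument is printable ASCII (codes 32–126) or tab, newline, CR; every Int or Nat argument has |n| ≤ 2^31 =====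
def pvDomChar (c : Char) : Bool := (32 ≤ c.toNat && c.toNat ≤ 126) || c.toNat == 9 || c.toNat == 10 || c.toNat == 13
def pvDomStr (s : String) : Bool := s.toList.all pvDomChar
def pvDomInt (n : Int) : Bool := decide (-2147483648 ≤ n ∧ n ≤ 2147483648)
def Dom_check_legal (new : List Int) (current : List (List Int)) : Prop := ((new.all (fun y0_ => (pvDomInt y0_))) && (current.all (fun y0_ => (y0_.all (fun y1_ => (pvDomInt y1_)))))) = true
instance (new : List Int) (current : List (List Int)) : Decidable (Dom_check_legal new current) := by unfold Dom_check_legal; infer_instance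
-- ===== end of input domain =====

-- B replaces A's per-group pairwise membership tests (with early return) by an
-- inverted index value -> group indices, then intersects the posting lists of
-- new[0], new[1], new[2] pairwise (objective: alternative).

-- ===== PORT A =====
-- Literal port of A: one pass over current; per elem, the two branch tests on
-- new[0], new[1], new[2]. Python raises IndexError when a branch actually
-- reaches an out-of-range index; Pre_ excludes len(new) < 3 with nonempty
-- current (the .getD 0 is never the value used inside Pre_).
def check_legal (new : List Int) (current : List (List Int)) : Bool :=
  match current with
  | [] => true
  | elem :: rest =>
    let n0 := (PySem.List.pyGet? new 0).getD 0
    let n1 := (PySem.List.pyGet? new 1).getD 0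
    let n2 := (PySem.List.pyGet? new 2).getD 0
    if elem.contains n0 && (elem.contains n1 || elem.contains n2) then false
    else if elem.contains n1 && elem.contains n2 then false
    else check_legal new rest

-- ===== PORT B =====
-- Port of B: build the inverted index occurs (occurs[v] = occurs.get(v, []) + [i]
-- over enumerate(current) is the Dict.modify fold), then the three 'any' tests
-- intersect the posting lists of new[0], new[1], new[2] pairwise.
def check_legal_alt (new : List Int) (current : List (List Int)) : Bool :=
  let occurs : PySem.Dict Int (List Int) :=
    (PySem.List.enumerate current 0).foldl
      (fun d p => p.2.foldl (fun d v => d.modify v [] (· ++ [p.1])) d)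
      PySem.Dict.empty
  match current with
  | [] => true
  | _ =>
    let a := (PySem.List.pyGet? new 0).getD 0
    let b := (PySem.List.pyGet? new 1).getD 0
    let c := (PySem.List.pyGet? new 2).getD 0
    let oa := occurs.getD a []
    let ob := occurs.getD b []
    let oc := occurs.getD c []
    !(oa.any (fun i => ob.contains i) || oa.any (fun i => oc.contains i) ||
      ob.any (fun i => oc.contains i))

-- ===== PRECONDITION & SPEC =====
-- Pre_ excludes len(new) < 3 with nonempty current, where A's new[0..2]
-- indexing in general raises IndexError; Boolean short-circuiting lets A still
-- return on some such inputs (e.g. new = [1,2] when some group contains both),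
-- but B's unconditional unpacking of new[0], new[1], new[2] raises there, so
-- those inputs are excluded.
def Pre_check_legal (new : List Int) (current : List (List Int)) : Prop :=
  current = [] ∨ 3 ≤ new.length
instance (new : List Int) (current : List (List Int)) : Decidable (Pre_check_legal new current) := by unfold Pre_check_legal; infer_instance

def pvWitness_check_legal : List Int × List (List Int) := ([1, 2, 3], [[1, 4], [2, 3]])

def Spec_check_legal (new : List Int) (current : List (List Int)) (out : Bool) : Prop := out = check_legal_alt new current
instance (new : List Int) (current : List (List Int)) (out : Bool) : Decidable (Spec_check_legal new current out) := by unfold Spec_check_legal; infer_instance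

-- ===== CLAIM (what is proved, stated in full; the proofs are below) =====
def Claim_equal_check_legal : Prop := ∀ (new : List Int) (current : List (List Int)), Dom_check_legal new current → Pre_check_legal new current → Spec_check_legal new current (check_legal new current)

-- ===== LEMMAS AND PROOFS =====

-- The nested index-building loop is the flat modify-loop over all (value, index) pairs.
theorem build_eq_flat (l : List (Int × List Int)) (d : PySem.Dict Int (List Int)) :
    l.foldl (fun d p => p.2.foldl (fun d v => d.modify v [] (· ++ [p.1])) d) d
      = (l.flatMap (fun p => p.2.map (fun v => (v, p.1)))).foldl
          (fun d q => d.modify q.1 [] (· ++ [q.2])) d := by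
  induction l generalizing d with
  | nil => rfl
  | cons p rest ih =>
    simp only [List.foldl_cons, List.flatMap_cons, List.foldl_append, List.foldl_map, ih]

-- Membership in a posting list: j is listed under x iff group j contains x.
theorem mem_occurs (current : List (List Int)) (x j : Int) :
    j ∈ ((PySem.List.enumerate current 0).foldl
          (fun d p => p.2.foldl (fun d v => d.modify v [] (· ++ [p.1])) d)
          PySem.Dict.empty).getD x []
      ↔ ∃ (k : Nat), ∃ (h : k < current.length), x ∈ current[k] ∧ j = (k : Int) := by
  rw [build_eq_flat, PySem.Dict.getD_foldl_modify_append]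
  simp only [PySem.Dict.getD_empty, List.nil_append, List.mem_map, List.mem_filter,
    List.mem_flatMap, PySem.List.mem_enumerate_iff, beq_iff_eq]
  constructor
  · rintro ⟨q, ⟨⟨p, ⟨⟨k, h, rfl⟩, hq⟩⟩, hx⟩, rfl⟩
    obtain ⟨v, hv, rfl⟩ := hq
    simp only at hx
    exact ⟨k, h, hx ▸ hv, by simp⟩
  · rintro ⟨k, h, hx, rfl⟩
    refine ⟨(x, (k : Int)), ⟨⟨((0 : Int) + k, current[k]), ⟨k, h, rfl⟩, ?_⟩, rfl⟩, rfl⟩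
    exact ⟨x, hx, by simp⟩

-- A shared posting-list element for x and y is a group containing both.
theorem shared_iff (current : List (List Int)) (x y : Int) :
    (((PySem.List.enumerate current 0).foldl
        (fun d p => p.2.foldl (fun d v => d.modify v [] (· ++ [p.1])) d)
        PySem.Dict.empty).getD x []).any (fun i =>
      (((PySem.List.enumerate current 0).foldl
          (fun d p => p.2.foldl (fun d v => d.modify v [] (· ++ [p.1])) d)
          PySem.Dict.empty).getD y []).contains i) = true
      ↔ ∃ e ∈ current, x ∈ e ∧ y ∈ e := by
  rw [List.any_eq_true]
  constructor
  · rintro ⟨j, hj, hc⟩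
    rw [List.contains_iff_mem, mem_occurs] at hc
    rw [mem_occurs] at hj
    obtain ⟨k, h, hx, hjk⟩ := hj
    obtain ⟨k', h', hy, hjk'⟩ := hc
    have hkk : k' = k := by
      have : (k' : Int) = (k : Int) := by rw [← hjk, ← hjk']
      exact_mod_cast this
    subst hkk
    exact ⟨current[k'], List.getElem_mem h', hx, hy⟩
  · rintro ⟨e, he, hx, hy⟩
    obtain ⟨k, h, rfl⟩ := List.mem_iff_getElem.mp he
    refine ⟨(k : Int), (mem_occurs _ _ _).mpr ⟨k, h, hx, rfl⟩, ?_⟩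
    rw [List.contains_iff_mem, mem_occurs]
    exact ⟨k, h, hy, rfl⟩

-- A's loop, characterised: legal iff no group triggers either branch.
theorem check_legal_iff (new : List Int) (current : List (List Int)) :
    check_legal new current = true
      ↔ ∀ e ∈ current,
          ¬((e.contains ((PySem.List.pyGet? new 0).getD 0)
              && (e.contains ((PySem.List.pyGet? new 1).getD 0)
                  || e.contains ((PySem.List.pyGet? new 2).getD 0))
            || e.contains ((PySem.List.pyGet? new 1).getD 0)
              && e.contains ((PySem.List.pyGet? new 2).getD 0)) = true) := by
  induction current with
  | nil => simp [check_legal]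
  | cons elem rest ih =>
    simp only [check_legal, List.mem_cons]
    split_ifs with h1 h2
    · constructor
      · intro h; exact absurd h (by simp)
      · intro h; exact absurd (Bool.or_eq_true_iff.mpr (Or.inl h1)) (h elem (Or.inl rfl))
    · constructor
      · intro h; exact absurd h (by simp)
      · intro h; exact absurd (Bool.or_eq_true_iff.mpr (Or.inr h2)) (h elem (Or.inl rfl))
    · rw [ih]
      constructor
      · rintro h e (rfl | he)
        · simp only [Bool.or_eq_true_iff]; rintro (hc | hc)
          · exact h1 hc
          · exact h2 hc
        · exact h e he
      · intro h e he; exact h e (Or.inr he)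

-- ===== VERDICT (by name: the statement is the Claim_ definition above) =====
theorem check_legal_spec : Claim_equal_check_legal := by
  intro new current _ hpre
  unfold Spec_check_legal
  rcases current with _ | ⟨elem, rest⟩
  · rfl
  · rw [Bool.eq_iff_iff, check_legal_iff]
    unfold check_legal_alt
    simp only [Bool.not_eq_true', ← Bool.not_eq_true, shared_iff,
      Bool.or_eq_true, Bool.and_eq_true, List.contains_iff_mem]
    constructor
    · intro h hc
      rcases hc with (⟨e, he, hx, hy⟩ | ⟨e, he, hx, hy⟩) | ⟨e, he, hx, hy⟩ <;>
        · have := h e he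
          tauto
    · intro h e he hc
      rcases hc with ⟨h0, h1 | h2⟩ | ⟨h1, h2⟩
      · exact h (Or.inl (Or.inl ⟨e, he, h0, h1⟩))
      · exact h (Or.inl (Or.inr ⟨e, he, h0, h2⟩))
      · exact h (Or.inr ⟨e, he, h1, h2⟩)
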